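-- pv_equiv track=rewrite | github.com/AfoninaOlga/formal_languages | src/cyk_analyzer.py | get_lexemes
-- ===== SOURCE A (Python) =====
-- keywords = {
--     'connect', 'select', 'from', 'intersect', 'name'
--     , 'eps', 'count', 'edges', 'query', 'alt', 'seq'
--     , 'star', 'plus', 'opt'
-- }
--
-- def get_lexemes(script):
--     lexemes = []
--     for w in script.split():
--         if w in keywords:
--             lexemes.append(w)
--         else:
--             lexemes.extend(w)
--     return lexemes
-- ===== SOURCE B (Python) =====
-- keywords = {
--     'connect', 'select', 'from', 'intersect', 'name'
--     , 'eps', 'count', 'edges', 'query', 'alt', 'seq'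
--     , 'star', 'plus', 'opt'
-- }
--
-- def _flush(lexemes, buf):
--     word = ''.join(buf)
--     lexemes += [word] if word in keywords else list(word)
--
-- def get_lexemes(script):
--     lexemes = []
--     buf = []
--     for c in script:
--         if c.isspace():
--             if buf:
--                 _flush(lexemes, buf)
--                 buf = []
--         else:
--             buf.append(c)
--     if buf:
--         _flush(lexemes, buf)
--     return lexemes
-- ===== Notes on version B (the rewrite author's own statement) =====
-- stated objective: alternative
-- what changed: Replaces split()-then-per-word loop with a single character-level scan that maintains a current-word buffer and flushes it at whitespace boundaries.
import Mathlib
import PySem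

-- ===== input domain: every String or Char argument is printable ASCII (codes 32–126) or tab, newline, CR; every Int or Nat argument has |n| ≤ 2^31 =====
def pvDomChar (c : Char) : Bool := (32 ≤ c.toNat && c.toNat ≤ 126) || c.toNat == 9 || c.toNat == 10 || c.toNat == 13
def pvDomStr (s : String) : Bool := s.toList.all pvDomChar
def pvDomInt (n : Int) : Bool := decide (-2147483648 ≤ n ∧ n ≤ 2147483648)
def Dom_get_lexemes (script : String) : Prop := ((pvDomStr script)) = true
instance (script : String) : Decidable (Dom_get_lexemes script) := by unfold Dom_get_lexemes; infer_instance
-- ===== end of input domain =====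

-- B replaces A's split()-then-per-word loop with a single character-level scan
-- maintaining a current-word buffer (objective: alternative decomposition, same cost).


-- the module-level Python set `keywords`
def pvKeywords : PySem.Set String := PySem.Set.ofList
  ["connect", "select", "from", "intersect", "name"
  , "eps", "count", "edges", "query", "alt", "seq"
  , "star", "plus", "opt"]

-- ===== PORT A =====
def get_lexemes (script : String) : List String :=
  (PySem.Str.split₀ script).foldl
    (fun lexemes w =>
      if PySem.Set.contains pvKeywords w then lexemes ++ [w]
      else lexemes ++ w.toList.map (fun c => String.ofList [c])) []

-- ===== PORT B =====
-- helper `_flush` of Source B: emit the buffered word (whole if a keyword, else char by char)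
def pvFlush (lexemes : List String) (buf : List Char) : List String :=
  let word := String.ofList buf
  if PySem.Set.contains pvKeywords word then lexemes ++ [word]
  else lexemes ++ buf.map (fun c => String.ofList [c])

-- the char-by-char loop of Source B (buf accumulated in order; final flush after the loop)
def pvAltGo : List Char → List Char → List String → List String
  | [], buf, lexemes => if buf.isEmpty then lexemes else pvFlush lexemes buf
  | c :: rest, buf, lexemes =>
    if PySem.Chars.isspace c then
      if buf.isEmpty then pvAltGo rest [] lexemes
      else pvAltGo rest [] (pvFlush lexemes buf)
    else pvAltGo rest (buf ++ [c]) lexemes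

def get_lexemes_alt (script : String) : List String :=
  pvAltGo script.toList [] []

-- ===== PRECONDITION & SPEC =====
def Spec_get_lexemes (script : String) (out : List String) : Prop := out = get_lexemes_alt script
instance (script : String) (out : List String) : Decidable (Spec_get_lexemes script out) := by unfold Spec_get_lexemes; infer_instance

-- ===== CLAIM (what is proved, stated in full; the proofs are below) =====
def Claim_equal_get_lexemes : Prop := ∀ (script : String), Dom_get_lexemes script → Spec_get_lexemes script (get_lexemes script)

-- ===== LEMMAS AND PROOFS =====

-- A's per-word step, phrased on the char-list side
def pvStepC (lexemes : List String) (w : List Char) : List String :=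
  if PySem.Set.contains pvKeywords (String.ofList w) then lexemes ++ [String.ofList w]
  else lexemes ++ w.map (fun c => String.ofList [c])

theorem pv_go_acc (s : List Char) : ∀ (cur : List Char) (acc : List (List Char)),
    PySem.Chars.split₀.go s cur acc = acc.reverse ++ PySem.Chars.split₀.go s cur [] := by
  induction s with
  | nil =>
    intro cur acc
    simp only [PySem.Chars.split₀.go]
    by_cases h : cur.isEmpty = true
    · rw [if_pos h, if_pos h]; simp
    · rw [if_neg h, if_neg h]; simp
  | cons c rest ih =>
    intro cur acc
    simp only [PySem.Chars.split₀.go]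
    by_cases hs : PySem.Chars.isspace c = true
    · rw [if_pos hs, if_pos hs]
      by_cases h : cur.isEmpty = true
      · rw [if_pos h, if_pos h]
        exact ih [] acc
      · rw [if_neg h, if_neg h]
        rw [ih [] (cur.reverse :: acc), ih [] [cur.reverse]]
        simp
    · rw [if_neg hs, if_neg hs]
      exact ih (c :: cur) acc

theorem pv_altGo_eq (s : List Char) : ∀ (buf : List Char) (lexemes : List String),
    pvAltGo s buf lexemes = List.foldl pvStepC lexemes (PySem.Chars.split₀.go s buf.reverse []) := by
  induction s with
  | nil =>
    intro buf lexemes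
    simp only [pvAltGo, PySem.Chars.split₀.go]
    by_cases h : buf.isEmpty = true
    · rw [if_pos h, if_pos (by simpa using h)]
      simp
    · rw [if_neg h, if_neg (by simpa using h)]
      simp [pvFlush, pvStepC]
  | cons c rest ih =>
    intro buf lexemes
    simp only [pvAltGo, PySem.Chars.split₀.go]
    by_cases hs : PySem.Chars.isspace c = true
    · rw [if_pos hs, if_pos hs]
      by_cases h : buf.isEmpty = true
      · have hb : buf = [] := List.isEmpty_iff.mp h
        rw [if_pos h, if_pos (by simp [hb])]
        simpa [hb] using ih [] lexemes
      · rw [if_neg h, if_neg (by simpa using h)]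
        rw [ih [] (pvFlush lexemes buf), pv_go_acc rest [] [buf.reverse.reverse]]
        simp [pvFlush, pvStepC]
    · rw [if_neg hs, if_neg hs]
      rw [ih (buf ++ [c]) lexemes]
      simp

-- ===== VERDICT (by name: the statement is the Claim_ definition above) =====
theorem get_lexemes_spec : Claim_equal_get_lexemes := by
  intro script _
  unfold Spec_get_lexemes get_lexemes get_lexemes_alt
  rw [PySem.Str.split₀, List.foldl_map, PySem.Chars.split₀, pv_altGo_eq]
  simp only [String.toList_ofList]
  rfl
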